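-- pv_equiv track=rewrite | github.com/Alferdize/Data-Structure-and-Algorithms | Algorithms/binary_search.com/AsbeforeBs.py | solve
-- ===== SOURCE A (Python) =====
-- def solve(s):
--     a = s.count('A')
--     b = 0
--     ans = a+b
--     for c in s:
--         if c == 'A':
--             a -= 1
--         else:
--             b += 1
--         ans = min(ans, a+b)
--     return ans
-- ===== SOURCE B (Python) =====
-- def solve(s):
--     res = 0
--     cntB = 0
--     for c in s:
--         if c == 'A':
--             res = min(res + 1, cntB)
--         else:
--             cntB += 1
--     return res
-- ===== Notes on version B (the rewrite author's own statement) =====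
-- stated objective: simpler
-- what changed: Replaced A's count-all-A's-then-minimise-a+b-over-every-split scan with the classic running-minimum DP res = min(res+1, cntB) that needs no pre-count and only two state variables.
import Mathlib
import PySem

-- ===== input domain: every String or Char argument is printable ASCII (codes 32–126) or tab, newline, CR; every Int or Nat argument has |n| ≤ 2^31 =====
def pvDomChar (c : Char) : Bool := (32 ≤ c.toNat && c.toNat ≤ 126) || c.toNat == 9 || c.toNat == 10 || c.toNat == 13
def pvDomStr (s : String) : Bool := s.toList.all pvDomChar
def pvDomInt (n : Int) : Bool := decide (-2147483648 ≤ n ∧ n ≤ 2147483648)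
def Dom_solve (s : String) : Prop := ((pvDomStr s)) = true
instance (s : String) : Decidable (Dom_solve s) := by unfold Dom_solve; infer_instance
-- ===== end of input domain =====

-- B replaces A's "count all A's, then minimise a+b over every split while rescanning" state
-- with the classic running-minimum recurrence res = min(res+1, cntB); objective: simpler.

-- ===== PORT A =====
-- loop body of A: state (a, b, ans)
def solveStepA (st : Int × Int × Int) (c : Char) : Int × Int × Int :=
  if c == 'A' then (st.1 - 1, st.2.1, min st.2.2 ((st.1 - 1) + st.2.1))
  else (st.1, st.2.1 + 1, min st.2.2 (st.1 + (st.2.1 + 1)))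

def solve (s : String) : Int :=
  let a : Int := (PySem.Str.count s "A" : Int)
  let b : Int := 0
  let ans : Int := a + b
  (s.toList.foldl solveStepA (a, b, ans)).2.2

-- ===== PORT B =====
-- loop body of B: state (res, cntB)
def solveStepB (st : Int × Int) (c : Char) : Int × Int :=
  if c == 'A' then (min (st.1 + 1) st.2, st.2)
  else (st.1, st.2 + 1)

def solve_alt (s : String) : Int :=
  (s.toList.foldl solveStepB (0, 0)).1

-- ===== PRECONDITION & SPEC =====
def Spec_solve (s : String) (out : Int) : Prop := out = solve_alt s
instance (s : String) (out : Int) : Decidable (Spec_solve s out) := by unfold Spec_solve; infer_instance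

-- ===== CLAIM (what is proved, stated in full; the proofs are below) =====
def Claim_equal_solve : Prop := ∀ (s : String), Dom_solve s → Spec_solve s (solve s)

-- ===== LEMMAS AND PROOFS =====

-- PySem.Chars.count over a single-character pattern is List.count
lemma countGo_single (l : List Char) : ∀ (fuel acc : Nat), l.length ≤ fuel →
    PySem.Chars.count.go ['A'] fuel l acc = acc + l.count 'A' := by
  induction l with
  | nil => intro fuel acc _; cases fuel <;> simp [PySem.Chars.count.go]
  | cons c t ih =>
    intro fuel acc h
    cases fuel with
    | zero => simp at h
    | succ n =>
      by_cases hc : c = 'A'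
      · subst hc
        simp only [PySem.Chars.count.go]
        rw [if_pos (by simp [List.isPrefixOf])]
        simp only [List.length_cons, List.length_nil, Nat.zero_add, List.drop_one,
          List.tail_cons]
        rw [ih n (acc + 1) (by simpa using h)]
        simp only [List.count_cons_self, Nat.cast_add, Nat.cast_one]
        omega
      · simp only [PySem.Chars.count.go]
        rw [if_neg (by simp [List.isPrefixOf_iff_prefix, List.prefix_cons_iff, Ne.symm hc])]
        rw [ih n acc (by simpa using h)]
        simp [hc]

lemma count_single (l : List Char) : PySem.Chars.count l ['A'] = l.count 'A' := by
  simp [PySem.Chars.count, countGo_single l l.length 0 le_rfl]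

-- the loop invariant: A's running `ans` is B's `res` shifted by the A's still ahead
lemma key (l : List Char) : ∀ (cntB res : Int), res ≤ cntB →
    (l.foldl solveStepA ((l.count 'A' : Int), cntB, res + (l.count 'A' : Int))).2.2
      = (l.foldl solveStepB (res, cntB)).1 := by
  induction l with
  | nil => intro cntB res _; simp
  | cons c t ih =>
    intro cntB res h
    by_cases hc : c = 'A'
    · subst hc
      simp only [List.foldl_cons, solveStepA, solveStepB, if_pos (by simp : ('A' == 'A') = true)]
      have hst : ((((t.count 'A' : Int) + 1) - 1 : Int), cntB,
            min (res + ((t.count 'A' : Int) + 1)) ((((t.count 'A' : Int) + 1) - 1) + cntB))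
          = ((t.count 'A' : Int), cntB, (min (res + 1) cntB) + (t.count 'A' : Int)) := by
        refine Prod.ext (by omega) (Prod.ext rfl ?_)
        simp only
        omega
      rw [List.count_cons_self, Nat.cast_add, Nat.cast_one, hst]
      exact ih cntB (min (res + 1) cntB) (by omega)
    · have hb : (c == 'A') = false := by simp [hc]
      simp only [List.foldl_cons, solveStepA, solveStepB, hb, Bool.false_eq_true, if_false]
      have hst : (((t.count 'A' : Int)), cntB + 1,
            min (res + (t.count 'A' : Int)) ((t.count 'A' : Int) + (cntB + 1)))
          = ((t.count 'A' : Int), cntB + 1, res + (t.count 'A' : Int)) := by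
        refine Prod.ext rfl (Prod.ext rfl ?_)
        simp only
        omega
      rw [List.count_cons_of_ne hc, hst]
      exact ih (cntB + 1) res (by omega)

-- ===== VERDICT (by name: the statement is the Claim_ definition above) =====
theorem solve_spec : Claim_equal_solve := by
  intro s _
  unfold Spec_solve solve solve_alt
  have hA : ("A" : String).toList = ['A'] := rfl
  simp only [PySem.Str.count, hA, count_single]
  have := key s.toList 0 0 le_rfl
  simpa using this
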